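-- pv_equiv track=rewrite | github.com/Sekitoba-One-hundred-million/sekitoba_data_collect | traner_collect.py | url_create
-- ===== SOURCE A (Python) =====
-- def url_create( base_url ):
--     base_url = base_url.split( "/" )
--     url = ""
--
--     for i in range( 0, len( base_url ) - 1):
--         url += base_url[i]
--         url += "/"
--
--         if i == 3:
--             url += "result/"
--
--     return url
-- ===== SOURCE B (Python) =====
-- def url_create(base_url):
--     kept = base_url.split("/")[:-1]
--     if len(kept) >= 4:
--         kept.insert(4, "result")
--     return "/".join(kept) + "/" if kept else ""
-- ===== Notes on version B (the rewrite author's own statement) =====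
-- stated objective: simpler
-- what changed: Replaces the index loop that conditionally appends the extra marker segment inside each iteration with list operations: slice off the last segment, splice the marker in by index, and join once with a trailing separator.
import Mathlib
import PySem

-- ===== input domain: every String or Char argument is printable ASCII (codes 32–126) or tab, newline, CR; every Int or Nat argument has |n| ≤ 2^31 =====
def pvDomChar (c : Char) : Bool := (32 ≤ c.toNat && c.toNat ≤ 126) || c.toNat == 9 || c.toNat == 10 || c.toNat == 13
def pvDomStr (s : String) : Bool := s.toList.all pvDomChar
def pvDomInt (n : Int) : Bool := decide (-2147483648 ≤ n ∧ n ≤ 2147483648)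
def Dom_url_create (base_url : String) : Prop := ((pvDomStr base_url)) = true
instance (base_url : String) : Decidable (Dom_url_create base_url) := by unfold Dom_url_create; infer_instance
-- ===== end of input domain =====

-- B replaces A's index loop (which conditionally appends "result/" inside the loop) by list
-- operations: drop the last segment with a slice, splice "result" in by index, join once (simpler).

-- ===== PORT A =====
-- the separator is the literal "/" (nonempty), so Python's split never raises: split? is `some` here and `.getD []` is exact
def url_create (base_url : String) : String :=
  let parts := (PySem.Str.split? base_url "/").getD []
  (PySem.List.pyRange 0 ((parts.length : Int) - 1) 1).foldl
    (fun url i =>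
      let url := url ++ PySem.List.pyGetD parts i ""
      let url := url ++ "/"
      if i == 3 then url ++ "result/" else url) ""

-- ===== PORT B =====
def url_create_alt (base_url : String) : String :=
  let kept := PySem.List.slice ((PySem.Str.split? base_url "/").getD []) none (some (-1))
  let kept := if 4 ≤ kept.length then PySem.List.insert kept 4 "result" else kept
  if kept ≠ [] then PySem.Str.join "/" kept ++ "/" else ""

-- ===== PRECONDITION & SPEC =====
def Spec_url_create (base_url : String) (out : String) : Prop := out = url_create_alt base_url
instance (base_url : String) (out : String) : Decidable (Spec_url_create base_url out) := by unfold Spec_url_create; infer_instance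

-- ===== CLAIM (what is proved, stated in full; the proofs are below) =====
def Claim_equal_url_create : Prop := ∀ (base_url : String), Dom_url_create base_url → Spec_url_create base_url (url_create base_url)

-- ===== LEMMAS AND PROOFS =====

/-- the concatenation "x₀/x₁/…/xₙ/" both programs build after the special prefix -/
def joinSlash : List String → String
  | [] => ""
  | x :: xs => x ++ "/" ++ joinSlash xs

theorem slice_dropLast (xs : List String) :
    PySem.List.slice xs none (some (-1)) = xs.dropLast := by
  simp [PySem.List.slice, List.dropLast_eq_take]

theorem join_slash (x : String) (xs : List String) :
    PySem.Str.join "/" (x :: xs) ++ "/" = x ++ "/" ++ joinSlash xs := by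
  induction xs generalizing x with
  | nil =>
      rw [← String.toList_inj]
      simp [joinSlash, PySem.Str.toList_join, PySem.Chars.join_singleton]
  | cons y ys ih =>
      have h : PySem.Str.join "/" (x :: y :: ys) = x ++ "/" ++ PySem.Str.join "/" (y :: ys) := by
        rw [← String.toList_inj]
        simp [PySem.Str.toList_join, PySem.Chars.join_cons_cons]
      calc (PySem.Str.join "/" (x :: y :: ys)) ++ "/"
          = (x ++ "/" ++ PySem.Str.join "/" (y :: ys)) ++ "/" := by rw [h]
        _ = x ++ "/" ++ (PySem.Str.join "/" (y :: ys) ++ "/") := by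
              rw [← String.toList_inj]; simp
        _ = x ++ "/" ++ (y ++ "/" ++ joinSlash ys) := by rw [ih]
        _ = x ++ "/" ++ joinSlash (y :: ys) := rfl

theorem fold_tail (xs : List String) : ∀ (s : Int) (acc : String), 4 ≤ s →
    (PySem.List.enumerate xs s).foldl
      (fun url p =>
        let url := url ++ p.2
        let url := url ++ "/"
        if p.1 == 3 then url ++ "result/" else url) acc
    = acc ++ joinSlash xs := by
  induction xs with
  | nil => intro s acc _; simp [PySem.List.enumerate, joinSlash]
  | cons x xs ih =>
      intro s acc hs
      have hne : (s == (3:Int)) = false := by simp; omega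
      have hcons : PySem.List.enumerate (x :: xs) s = (s, x) :: PySem.List.enumerate xs (s+1) := by
        simp [PySem.List.enumerate]
      rw [hcons, List.foldl_cons]
      simp only [hne]
      rw [ih (s+1) _ (by omega)]
      rw [← String.toList_inj]; simp [joinSlash]

/-- A's index loop over the kept segments equals B's splice-and-join. -/
theorem foldKept (kept : List String) :
    (PySem.List.pyRange 0 (kept.length : Int) 1).foldl
      (fun url i =>
        let url := url ++ PySem.List.pyGetD kept i ""
        let url := url ++ "/"
        if i == 3 then url ++ "result/" else url) ""
    = (let kept' := if 4 ≤ kept.length then PySem.List.insert kept 4 "result" else kept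
       if kept' ≠ [] then PySem.Str.join "/" kept' ++ "/" else "") := by
  have he : (PySem.List.pyRange 0 (kept.length : Int) 1).foldl
      (fun url i =>
        let url := url ++ PySem.List.pyGetD kept i ""
        let url := url ++ "/"
        if i == 3 then url ++ "result/" else url) ""
      = (PySem.List.enumerate kept 0).foldl
      (fun url p =>
        let url := url ++ p.2
        let url := url ++ "/"
        if p.1 == 3 then url ++ "result/" else url) "" := by
    rw [PySem.List.enumerate_eq_map_pyRange kept "", List.foldl_map]
    simp [PySem.List.len]
  rw [he]
  match kept with
  | [] => simp [PySem.List.enumerate]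
  | [a] =>
      simp only [PySem.List.enumerate, List.foldl_cons, List.foldl_nil]
      rw [← String.toList_inj]
      simp [PySem.Str.toList_join, PySem.Chars.join_singleton]
  | [a, b] =>
      simp only [PySem.List.enumerate, List.foldl_cons, List.foldl_nil]
      rw [← String.toList_inj]
      simp [PySem.Str.toList_join, PySem.Chars.join_cons_cons, PySem.Chars.join_singleton]
  | [a, b, c] =>
      simp only [PySem.List.enumerate, List.foldl_cons, List.foldl_nil]
      rw [← String.toList_inj]
      simp [PySem.Str.toList_join, PySem.Chars.join_cons_cons, PySem.Chars.join_singleton]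
  | a :: b :: c :: d :: rest =>
      have h4 : 4 ≤ (a :: b :: c :: d :: rest).length := by simp
      have hins : PySem.List.insert (a :: b :: c :: d :: rest) 4 "result"
          = a :: b :: c :: d :: "result" :: rest := by
        rw [PySem.List.insert_ofNat _ 4 _ h4]; rfl
      have hcons : PySem.List.enumerate (a :: b :: c :: d :: rest) 0
          = (0, a) :: (1, b) :: (2, c) :: (3, d) :: PySem.List.enumerate rest 4 := by
        simp [PySem.List.enumerate]
      rw [hcons, List.foldl_cons, List.foldl_cons, List.foldl_cons, List.foldl_cons]
      show List.foldl _
          ((((((((("" ++ a) ++ "/") ++ b) ++ "/") ++ c) ++ "/") ++ d) ++ "/") ++ "result/")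
          (PySem.List.enumerate rest 4) = _
      rw [fold_tail rest 4 _ (by omega)]
      rw [if_pos h4, hins,
        if_pos (by simp : (a :: b :: c :: d :: "result" :: rest : List String) ≠ [])]
      rw [join_slash]
      rw [← String.toList_inj]; simp [joinSlash]

-- ===== VERDICT (by name: the statement is the Claim_ definition above) =====
theorem url_create_spec : Claim_equal_url_create := by
  intro base_url _
  unfold Spec_url_create url_create url_create_alt
  generalize (PySem.Str.split? base_url "/").getD [] = parts
  simp only [slice_dropLast]
  match parts with
  | [] => simp [PySem.List.pyRange]
  | p :: rest =>
      have hlen : ((p :: rest).length : Int) - 1 = ((p :: rest).dropLast.length : Int) := by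
        simp
      rw [hlen]
      rw [← foldKept (p :: rest).dropLast]
      apply PySem.List.foldl_congr_mem
      intro acc x hx
      have hb := (PySem.List.mem_pyRange_one).mp hx
      have hx0 : 0 ≤ x := hb.1
      have hx1 : x < ((p :: rest).dropLast.length : Int) := hb.2
      have hx1' : x < ((p :: rest).length : Int) := by simp at hx1 ⊢; omega
      rw [PySem.List.pyGetD_eq_getElem _ _ hx0 hx1', PySem.List.pyGetD_eq_getElem _ _ hx0 hx1]
      simp [List.getElem_dropLast]
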